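-- pv_equiv track=rewrite | github.com/amrouchk/pdffonts | font.py | analyze_fonts
-- ===== SOURCE A (Python) =====
-- from collections import Counter
--
-- def analyze_fonts(font_sizes, text_by_size):
--     counter = Counter(font_sizes)
--     most_common = counter.most_common()
--     if not most_common:
--         return None, None
--     main_text_size = most_common[0][0]
--     title_candidates = [size for size in sorted(counter.keys(), reverse=True) if size != main_text_size]
--     title_size = title_candidates[0] if title_candidates else None
--     return main_text_size, title_size
-- ===== SOURCE B (Python) =====
-- def analyze_fonts(font_sizes, text_by_size):
--     counts = {}
--     for s in font_sizes:
--         counts[s] = counts.get(s, 0) + 1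
--     if not counts:
--         return None, None
--     main_text_size = max(counts, key=counts.get)
--     title_size = None
--     for s in counts:
--         if s != main_text_size and (title_size is None or title_size < s):
--             title_size = s
--     return main_text_size, title_size
-- ===== Notes on version B (the rewrite author's own statement) =====
-- stated objective: simpler
-- what changed: Replaces Counter.most_common() (a full sort of the items by count) and the reverse-sorted key list with two single linear scans: a max-by-count pass over a hand-built count dict for the main size, and a running-max pass over the remaining keys for the title size; no sorting at all.
import Mathlib
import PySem

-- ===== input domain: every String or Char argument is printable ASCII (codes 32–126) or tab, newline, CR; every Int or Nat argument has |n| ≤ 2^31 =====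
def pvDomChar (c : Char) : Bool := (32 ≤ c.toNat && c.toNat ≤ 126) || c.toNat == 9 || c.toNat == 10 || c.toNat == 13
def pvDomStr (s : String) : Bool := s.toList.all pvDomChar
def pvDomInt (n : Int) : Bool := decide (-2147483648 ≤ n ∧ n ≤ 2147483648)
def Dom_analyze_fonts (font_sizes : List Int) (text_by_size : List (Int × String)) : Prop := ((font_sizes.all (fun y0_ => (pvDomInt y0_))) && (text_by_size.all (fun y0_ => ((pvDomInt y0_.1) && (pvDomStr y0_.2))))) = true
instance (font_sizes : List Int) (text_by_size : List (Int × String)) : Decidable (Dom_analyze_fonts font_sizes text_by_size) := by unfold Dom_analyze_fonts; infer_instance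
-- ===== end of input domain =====

-- B replaces the two sorts (most_common and the reverse-sorted key list) by two linear
-- scans (max by count, then a running max over the remaining keys): simpler, no sorting.

-- ===== PORT A =====
def analyze_fonts (font_sizes : List Int) (text_by_size : List (Int × String)) : Option Int × Option Int :=
  let counter := PySem.Dict.counter font_sizes
  -- Counter.most_common() = sorted(items, key=itemgetter(1), reverse=True)
  let most_common := PySem.List.sorted counter.items (fun p => p.2) true
  match most_common with
  | [] => (none, none)
  | mc0 :: _ =>
    let main_text_size := mc0.1
    let title_candidates := (PySem.List.sorted counter.keys (fun s => s) true).filter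
      (fun s => s != main_text_size)
    let title_size := title_candidates.head?
    (some main_text_size, title_size)

-- ===== PORT B =====
def analyze_fonts_alt (font_sizes : List Int) (text_by_size : List (Int × String)) : Option Int × Option Int :=
  let counts : PySem.Dict Int Int :=
    font_sizes.foldl (fun d s => d.insert s (d.getD s 0 + 1)) PySem.Dict.empty
  if counts.items.isEmpty then (none, none)
  else
    match PySem.List.max? counts.keys (fun s => counts.getD s 0) with
    | none => (none, none)  -- unreachable: counts is non-empty
    | some main_text_size =>
      let title_size := counts.keys.foldl
        (fun t s => if (s != main_text_size) && t.all (fun v => decide (v < s)) then some s else t)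
        (none : Option Int)
      (some main_text_size, title_size)

-- ===== PRECONDITION & SPEC =====
def Spec_analyze_fonts (font_sizes : List Int) (text_by_size : List (Int × String)) (out : Option Int × Option Int) : Prop := out = analyze_fonts_alt font_sizes text_by_size
instance (font_sizes : List Int) (text_by_size : List (Int × String)) (out : Option Int × Option Int) : Decidable (Spec_analyze_fonts font_sizes text_by_size out) := by unfold Spec_analyze_fonts; infer_instance

-- ===== CLAIM (what is proved, stated in full; the proofs are below) =====
def Claim_equal_analyze_fonts : Prop := ∀ (font_sizes : List Int) (text_by_size : List (Int × String)), Dom_analyze_fonts font_sizes text_by_size → Spec_analyze_fonts font_sizes text_by_size (analyze_fonts font_sizes text_by_size)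

-- ===== LEMMAS AND PROOFS =====

-- insertBy puts x in front when it goes before every element
theorem pv_insertBy_front {α : Type} (before : α → α → Bool) (x : α) (zs : List α)
    (h : ∀ z ∈ zs, before x z = true) :
    PySem.List.insertBy before x zs = x :: zs := by
  cases zs with
  | nil => rfl
  | cons z t => simp [PySem.List.insertBy, h z (by simp)]

-- head of a Python reverse-sorted list is the FIRST maximal element
theorem pv_sorted_rev_append_singleton {α : Type} (m : List α) (key : α → Int) (x : α) :
    PySem.List.sorted (m ++ [x]) key true =
      PySem.List.insertBy (fun a b => decide (key b < key a)) x (PySem.List.sorted m key true) := by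
  rw [PySem.List.sorted_rev_eq_foldl_insertBy, PySem.List.sorted_rev_eq_foldl_insertBy,
    List.foldl_append, List.foldl_cons, List.foldl_nil]

theorem pv_head_sorted_rev {α : Type} (l : List α) (key : α → Int) :
    (PySem.List.sorted l key true).head? = PySem.List.max? l key := by
  induction l using List.reverseRecOn with
  | nil => rfl
  | append_singleton l x ih =>
    have hmax : PySem.List.max? (l ++ [x]) key =
        match PySem.List.max? l key with
        | none => some x
        | some m => if key m < key x then some x else some m := by
      simp only [PySem.List.max?, List.foldl_append, List.foldl_cons, List.foldl_nil]
      rfl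
    rw [pv_sorted_rev_append_singleton, hmax]
    cases hys : PySem.List.sorted l key true with
    | nil =>
      have hl : l = [] := (PySem.List.sorted_eq_nil_iff l key true).mp hys
      subst hl
      rfl
    | cons y t =>
      rw [hys] at ih
      simp only [List.head?] at ih
      rw [← ih]
      by_cases hlt : key y < key x
      · simp [PySem.List.insertBy, hlt]
      · simp [PySem.List.insertBy, hlt]

-- filtering commutes with insertion into a descending list
theorem pv_filter_insertBy {α : Type} (p : α → Bool) (key : α → Int) (x : α) (ys : List α)
    (h : ys.Pairwise (fun a b => key b ≤ key a)) :
    (PySem.List.insertBy (fun a b => decide (key b < key a)) x ys).filter p =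
      if p x then PySem.List.insertBy (fun a b => decide (key b < key a)) x (ys.filter p)
      else ys.filter p := by
  induction ys with
  | nil => cases hpx : p x <;> simp [PySem.List.insertBy, hpx]
  | cons y t ih =>
    rw [List.pairwise_cons] at h
    obtain ⟨hy, ht⟩ := h
    by_cases hlt : key y < key x
    · simp only [PySem.List.insertBy, hlt, decide_true, if_true]
      by_cases hpx : p x
      · rw [if_pos hpx, pv_insertBy_front]
        · simp [List.filter_cons, hpx]
        · intro z hz
          have hz' : z ∈ y :: t := List.mem_of_mem_filter hz
          have hle : key z ≤ key y := by
            rcases List.mem_cons.mp hz' with h1 | h2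
            · exact le_of_eq (by rw [h1])
            · exact hy z h2
          simpa using lt_of_le_of_lt hle hlt
      · rw [if_neg hpx]
        simp [List.filter_cons, hpx]
    · rw [show PySem.List.insertBy (fun a b => decide (key b < key a)) x (y :: t)
            = y :: PySem.List.insertBy (fun a b => decide (key b < key a)) x t from by
          simp [PySem.List.insertBy, hlt]]
      rw [List.filter_cons, ih ht]
      by_cases hpx : p x
      · by_cases hpy : p y
        · simp [hpx, hpy, PySem.List.insertBy, hlt]
        · simp [hpx, hpy]
      · by_cases hpy : p y <;> simp [hpx, hpy]

-- filtering commutes with Python's stable reverse sort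
theorem pv_filter_sorted_rev {α : Type} (p : α → Bool) (key : α → Int) (l : List α) :
    (PySem.List.sorted l key true).filter p = PySem.List.sorted (l.filter p) key true := by
  induction l using List.reverseRecOn with
  | nil => rfl
  | append_singleton l x ih =>
    rw [pv_sorted_rev_append_singleton,
      pv_filter_insertBy p key x _ (PySem.List.sorted_pairwise_rev l key), ih,
      List.filter_append]
    by_cases hpx : p x
    · rw [if_pos hpx, show List.filter p [x] = [x] from by simp [hpx],
        pv_sorted_rev_append_singleton]
    · rw [if_neg hpx, show List.filter p [x] = ([] : List α) from by simp [hpx],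
        List.append_nil]

-- max? of a mapped list
theorem pv_max?_map {α β : Type} (f : α → β) (key : β → Int) (l : List α) :
    PySem.List.max? (l.map f) key = (PySem.List.max? l (fun x => key (f x))).map f := by
  suffices h : ∀ (acc : Option α),
      List.foldl (fun a y => match a with | none => some y | some m => if key m < key y then some y else some m)
        (acc.map f) (l.map f)
        = (List.foldl (fun a x => match a with | none => some x | some m => if key (f m) < key (f x) then some x else some m)
            acc l).map f by
    exact h none
  intro acc
  induction l generalizing acc with
  | nil => rfl
  | cons x t ih =>
    simp only [List.map_cons, List.foldl_cons]
    cases acc with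
    | none => exact ih (some x)
    | some m =>
      by_cases hlt : key (f m) < key (f x)
      · simp only [Option.map_some, hlt, if_pos]
        exact ih (some x)
      · simp only [Option.map_some, hlt, if_neg, not_false_iff]
        exact ih (some m)

-- the running-max loop of B computes max? of the filtered list
theorem pv_foldl_run_max (p : Int → Bool) (l : List Int) :
    l.foldl (fun t s => if p s && t.all (fun v => decide (v < s)) then some s else t)
      (none : Option Int)
      = PySem.List.max? (l.filter p) (fun s => s) := by
  have hstep : (fun (t : Option Int) s => if p s && t.all (fun v => decide (v < s)) then some s else t)
      = fun (t : Option Int) s => if p s then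
          (fun (t : Option Int) s => match t with
            | none => some s
            | some m => if m < s then some s else some m) t s else t := by
    funext t s
    cases t with
    | none => by_cases hp : p s <;> simp [hp, Option.all]
    | some v => by_cases hp : p s <;> by_cases hv : v < s <;> simp [hp, hv, Option.all]
  rw [hstep, PySem.List.foldl_if_eq_foldl_filter]
  simp only [PySem.List.max?]
  refine PySem.List.foldl_congr_mem _ _ _ _ ?_
  intro acc x _
  cases acc with
  | none => rfl
  | some m => by_cases h : m < x <;> simp [h]

-- the two sides of the equivalence, named
theorem pv_A_eq (xs : List Int) (t : List (Int × String)) (k0 : Int)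
    (hk0 : PySem.List.max? (PySem.Set.ofList xs) (fun k => ((xs.count k : Int))) = some k0) :
    analyze_fonts xs t =
      (some k0, PySem.List.max? ((PySem.Set.ofList xs).filter (fun s => s != k0)) (fun s => s)) := by
  have hA_head : (PySem.List.sorted ((PySem.Dict.counter xs).items)
      (fun p : Int × Int => p.2) true).head? = some (k0, (xs.count k0 : Int)) := by
    rw [pv_head_sorted_rev, PySem.Dict.items_counter,
      pv_max?_map (fun k : Int => (k, (xs.count k : Int))) (fun p : Int × Int => p.2)]
    rw [show (fun x : Int => (fun p : Int × Int => p.2) ((fun k : Int => (k, (xs.count k : Int))) x))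
        = fun k : Int => ((xs.count k : Int)) from rfl, hk0]
    rfl
  cases hms : PySem.List.sorted ((PySem.Dict.counter xs).items) (fun p : Int × Int => p.2) true with
  | nil => rw [hms] at hA_head; simp at hA_head
  | cons a rest =>
    rw [hms] at hA_head
    simp only [List.head?, Option.some.injEq] at hA_head
    simp only [analyze_fonts, hms, hA_head]
    rw [PySem.Dict.keys_counter, pv_filter_sorted_rev, pv_head_sorted_rev]

theorem pv_B_eq (xs : List Int) (t : List (Int × String)) (hS : PySem.Set.ofList xs ≠ [])
    (k0 : Int)
    (hk0 : PySem.List.max? (PySem.Set.ofList xs) (fun k => ((xs.count k : Int))) = some k0) :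
    analyze_fonts_alt xs t =
      (some k0, PySem.List.max? ((PySem.Set.ofList xs).filter (fun s => s != k0)) (fun s => s)) := by
  have hemp : ((PySem.Dict.counter xs).items).isEmpty = false := by
    rw [PySem.Dict.items_counter]
    cases h : PySem.Set.ofList xs with
    | nil => exact absurd h hS
    | cons a r => simp
  have hgetD : (fun s => (PySem.Dict.counter xs).getD s 0) = fun s : Int => ((xs.count s : Int)) :=
    funext (fun s => PySem.Dict.getD_counter xs s)
  simp only [analyze_fonts_alt, PySem.Dict.foldl_insert_getD_add_one_eq_counter, hemp,
    Bool.false_eq_true, if_false, PySem.Dict.keys_counter, hgetD, hk0]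
  rw [pv_foldl_run_max]

-- ===== VERDICT (by name: the statement is the Claim_ definition above) =====
theorem analyze_fonts_spec : Claim_equal_analyze_fonts := by
  intro xs t _
  show analyze_fonts xs t = analyze_fonts_alt xs t
  by_cases hx : xs = []
  · subst hx; rfl
  · have hS : PySem.Set.ofList xs ≠ [] := by
      cases xs with
      | nil => exact absurd rfl hx
      | cons a r =>
        intro h
        have ha : a ∈ PySem.Set.ofList (a :: r) := (PySem.Set.mem_ofList _ _).mpr (by simp)
        rw [h] at ha
        simp at ha
    obtain ⟨k0, hk0⟩ : ∃ k0,
        PySem.List.max? (PySem.Set.ofList xs) (fun k => ((xs.count k : Int))) = some k0 := by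
      cases h : PySem.List.max? (PySem.Set.ofList xs) (fun k => ((xs.count k : Int))) with
      | none => exact absurd ((PySem.List.max?_eq_none_iff _ _).mp h) hS
      | some k => exact ⟨k, rfl⟩
    rw [pv_A_eq xs t k0 hk0, pv_B_eq xs t hS k0 hk0]
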